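-- pv_equiv track=rewrite | github.com/SimonSheNNN/Python-16-Class | HW1.py | squareUpTo
-- ===== SOURCE A (Python) =====
-- def squareUpTo(n):
--     l=list()        #empty list
--      #in the range of n, in case of squareUpTo(1), use range(n+1) for safety
--     for i in range(n+1):
--         # n**2 is always bigger than n, so must in range
--         if i**2 <= n:
--             l.append (i)
--         #break when bigger to save time
--         else:
--             break
--     return l
-- ===== SOURCE B (Python) =====
-- def squareUpTo(n):
--     # Binary search for the largest m with m*m <= n, then emit 0..m in one bulk range.
--     if n < 0:
--         return []
--     lo, hi = 0, n + 1          # invariant: lo*lo <= n < hi*hi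
--     while lo + 1 < hi:
--         mid = (lo + hi) // 2
--         if mid * mid <= n:
--             lo = mid
--         else:
--             hi = mid
--     return list(range(lo + 1))
-- ===== Notes on version B (the rewrite author's own statement) =====
-- stated objective: alternative
-- what changed: Replaces the per-element square-and-test append loop by a binary search for the integer square root followed by one bulk range build.
import Mathlib
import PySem

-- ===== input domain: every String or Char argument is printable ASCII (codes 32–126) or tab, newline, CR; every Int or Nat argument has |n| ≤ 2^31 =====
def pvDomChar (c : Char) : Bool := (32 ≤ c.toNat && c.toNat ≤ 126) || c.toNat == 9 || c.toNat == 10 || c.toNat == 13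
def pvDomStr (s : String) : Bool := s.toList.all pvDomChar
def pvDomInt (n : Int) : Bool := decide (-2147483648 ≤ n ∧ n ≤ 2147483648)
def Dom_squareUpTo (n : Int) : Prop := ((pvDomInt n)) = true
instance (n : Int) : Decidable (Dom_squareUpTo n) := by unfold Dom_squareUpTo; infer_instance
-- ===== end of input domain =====

-- B replaces A's per-element square-and-test append loop by a binary search for the
-- integer square root followed by one bulk range build (objective: alternative algorithm; return value only, no mutation involved).


-- ===== PORT A =====
-- the for-loop with its early `break`: consume the range, appending while i**2 <= n
def squareUpToLoop (n : Int) : List Int → List Int → List Int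
  | [], l => l
  | i :: rest, l => if i ^ 2 ≤ n then squareUpToLoop n rest (l ++ [i]) else l

def squareUpTo (n : Int) : List Int :=
  squareUpToLoop n (PySem.List.pyRange 0 (n + 1) 1) []

-- ===== PORT B =====
-- the while-loop of Source B: binary search maintaining lo*lo <= n < hi*hi.
-- Structural recursion on a fuel bounding the iteration count (hi - lo shrinks by >= 1
-- each turn), so the fuel (hi - lo).toNat is exact; the loop body is Source B's verbatim.
def sqrtSearch (n : Int) : Nat → Int → Int → Int
  | 0, lo, _ => lo
  | fuel + 1, lo, hi =>
    if lo + 1 < hi then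
      let mid := PySem.Int.floordiv (lo + hi) 2
      if mid * mid ≤ n then sqrtSearch n fuel mid hi else sqrtSearch n fuel lo mid
    else lo

def squareUpTo_alt (n : Int) : List Int :=
  if n < 0 then []
  else PySem.List.pyRange 0 (sqrtSearch n (n + 1).toNat 0 (n + 1) + 1) 1

-- ===== PRECONDITION & SPEC =====
def Spec_squareUpTo (n : Int) (out : List Int) : Prop := out = squareUpTo_alt n
instance (n : Int) (out : List Int) : Decidable (Spec_squareUpTo n out) := by unfold Spec_squareUpTo; infer_instance

-- ===== CLAIM (what is proved, stated in full; the proofs are below) =====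
def Claim_equal_squareUpTo : Prop := ∀ (n : Int), Dom_squareUpTo n → Spec_squareUpTo n (squareUpTo n)

-- ===== LEMMAS AND PROOFS =====

-- A's loop is takeWhile appended to the accumulator
theorem squareUpToLoop_eq (n : Int) (xs l : List Int) :
    squareUpToLoop n xs l = l ++ xs.takeWhile (fun i => decide (i ^ 2 ≤ n)) := by
  induction xs generalizing l with
  | nil => simp [squareUpToLoop]
  | cons i rest ih =>
      by_cases h : i ^ 2 ≤ n
      · simp [squareUpToLoop, h, ih]
      · simp [squareUpToLoop, h]

theorem takeWhile_append_of_all {p : Int → Bool} (l1 l2 : List Int)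
    (h : ∀ x ∈ l1, p x = true) :
    (l1 ++ l2).takeWhile p = l1 ++ l2.takeWhile p := by
  induction l1 with
  | nil => simp
  | cons a t ih =>
      simp only [List.cons_append, List.takeWhile_cons, h a (by simp)]
      simp [ih (fun x hx => h x (by simp [hx]))]

-- correctness of the binary search: with enough fuel the final lo is the integer square root
theorem sqrtSearch_spec (n : Int) : ∀ (fuel : Nat) (lo hi : Int), 0 ≤ lo → lo < hi →
    (hi - lo).toNat ≤ fuel →
    lo * lo ≤ n → n < hi * hi →
    0 ≤ sqrtSearch n fuel lo hi ∧ sqrtSearch n fuel lo hi < hi ∧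
    sqrtSearch n fuel lo hi * sqrtSearch n fuel lo hi ≤ n ∧
    n < (sqrtSearch n fuel lo hi + 1) * (sqrtSearch n fuel lo hi + 1) := by
  intro fuel
  induction fuel with
  | zero => intro lo hi hlo hlt hfuel _ _; exfalso; omega
  | succ fuel ih =>
      intro lo hi hlo hlt hfuel hlon hnhi
      by_cases h : lo + 1 < hi
      · have hmid : PySem.Int.floordiv (lo + hi) 2 = (lo + hi) / 2 :=
          PySem.Int.floordiv_eq_ediv_of_pos (by omega)
        by_cases hm : PySem.Int.floordiv (lo + hi) 2 * PySem.Int.floordiv (lo + hi) 2 ≤ n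
        · rw [sqrtSearch, if_pos h]
          simp only [if_pos hm]
          exact ih _ hi (by omega) (by omega) (by omega) hm hnhi
        · rw [sqrtSearch, if_pos h]
          simp only [if_neg hm]
          have hcl := ih lo (PySem.Int.floordiv (lo + hi) 2) hlo (by omega) (by omega)
            hlon (by rw [not_le] at hm; exact hm)
          exact ⟨hcl.1, lt_trans hcl.2.1 (by omega), hcl.2.2⟩
      · rw [sqrtSearch, if_neg h]
        have : hi = lo + 1 := by omega
        subst this
        exact ⟨hlo, by omega, hlon, hnhi⟩

-- ===== VERDICT (by name: the statement is the Claim_ definition above) =====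
theorem squareUpTo_spec : Claim_equal_squareUpTo := by
  intro n _
  unfold Spec_squareUpTo squareUpTo squareUpTo_alt
  rw [squareUpToLoop_eq]
  by_cases hneg : n < 0
  · rw [if_pos hneg, PySem.List.pyRange_one_eq_nil (by omega)]
    simp
  · rw [if_neg hneg]
    rw [not_lt] at hneg
    set r := sqrtSearch n (n + 1).toNat 0 (n + 1) with hr
    have hspec := sqrtSearch_spec n (n + 1).toNat 0 (n + 1) le_rfl (by omega) (by omega)
      (by simpa using hneg) (by nlinarith)
    obtain ⟨hr0, hrlt, hrsq, hrsq1⟩ := hspec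
    have hsplit : PySem.List.pyRange 0 (n + 1) 1 =
        PySem.List.pyRange 0 (r + 1) 1 ++ PySem.List.pyRange (r + 1) (n + 1) 1 :=
      PySem.List.pyRange_one_append 0 (r + 1) (n + 1) (by omega) (by omega)
    rw [hsplit, takeWhile_append_of_all]
    · have htail : (PySem.List.pyRange (r + 1) (n + 1) 1).takeWhile
          (fun i => decide (i ^ 2 ≤ n)) = [] := by
        by_cases hc : r + 1 < n + 1
        · rw [PySem.List.pyRange_one_cons (by omega), List.takeWhile_cons]
          have : ¬ ((r + 1) ^ 2 ≤ n) := by nlinarith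
          simp [this]
        · rw [PySem.List.pyRange_one_eq_nil (by omega)]
          simp
      rw [htail, List.append_nil]
      simp
    · intro x hx
      have hmem := (PySem.List.mem_pyRange_one (a := 0) (b := r + 1) (x := x)).mp hx
      have : x * x ≤ r * r := by nlinarith
      simp only [decide_eq_true_eq]
      nlinarith
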